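-- pv_equiv track=rewrite | github.com/sanyukta-D/Optimal_Strategies_in_RCV | ballot_exhastion/simple_rcv_analysis_focused.py | calculate_preference_distributions
-- ===== SOURCE A (Python) =====
-- def calculate_preference_distributions(ballot_counts, candidates, first_pref):
--     """Calculate B>A vs A>B distributions for ballots with given first preference"""
--     b_over_a = 0
--     a_over_b = 0
--     total = 0
--
--     for ballot, count in ballot_counts.items():
--         if not ballot or ballot[0] != first_pref:
--             continue
--
--         # Check combinations of A and B in ballot
--         has_a = 'A' in ballot
--         has_b = 'B' in ballot
--
--         if has_a and has_b:
--             # Both A and B are ranked - use exact ordering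
--             total += count
--             if ballot.index('B') < ballot.index('A'):
--                 b_over_a += count
--             else:
--                 a_over_b += count
--         elif has_a and not has_b:
--             # Only A is ranked - count as A>B
--             total += count
--             a_over_b += count
--         elif has_b and not has_a:
--             # Only B is ranked - count as B>A
--             total += count
--             b_over_a += count
--
--     return b_over_a, a_over_b, total
-- ===== SOURCE B (Python) =====
-- def calculate_preference_distributions(ballot_counts, candidates, first_pref):
--     """Calculate B>A vs A>B distributions for ballots with given first preference"""
--     b_over_a = 0
--     a_over_b = 0
--     total = 0
--     for ballot, count in ballot_counts.items():
--         if ballot and ballot[0] == first_pref: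
--             # single early-terminating scan: first of 'A'/'B' to appear decides
--             first_ab = next((c for c in ballot if c == 'A' or c == 'B'), None)
--             if first_ab == 'B':
--                 b_over_a += count
--                 total += count
--             elif first_ab == 'A':
--                 a_over_b += count
--                 total += count
--     return b_over_a, a_over_b, total
-- ===== Notes on version B (the rewrite author's own statement) =====
-- stated objective: simpler
-- what changed: Replaces the two membership tests, two .index() scans and the three-way branch by one early-terminating scan per ballot that finds the first occurrence of 'A' or 'B' and decides directly.
import Mathlib
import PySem

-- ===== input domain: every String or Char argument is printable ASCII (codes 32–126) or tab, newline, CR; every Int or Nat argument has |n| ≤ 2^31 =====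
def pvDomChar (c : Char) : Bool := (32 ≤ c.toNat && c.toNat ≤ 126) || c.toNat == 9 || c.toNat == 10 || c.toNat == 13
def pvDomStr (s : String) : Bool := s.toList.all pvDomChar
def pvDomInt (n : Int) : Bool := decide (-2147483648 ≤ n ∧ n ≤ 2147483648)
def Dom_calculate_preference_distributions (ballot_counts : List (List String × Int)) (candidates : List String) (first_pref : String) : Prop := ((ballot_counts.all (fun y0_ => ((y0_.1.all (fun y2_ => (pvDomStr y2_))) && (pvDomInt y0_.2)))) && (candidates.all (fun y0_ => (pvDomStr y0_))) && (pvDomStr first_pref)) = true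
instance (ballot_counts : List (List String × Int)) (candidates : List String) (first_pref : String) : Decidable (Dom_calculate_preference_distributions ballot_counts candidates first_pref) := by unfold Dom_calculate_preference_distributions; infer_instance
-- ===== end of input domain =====

-- B replaces A's membership tests + two .index() scans + three-way branch by one
-- early-terminating scan per ballot (simpler decomposition, same exact results).


-- ===== PORT A =====
-- loop body of A, one (ballot, count) item at a time
def pvStepA (first_pref : String) (st : Int × Int × Int) (bc : List String × Int) : Int × Int × Int :=
  match bc.1 with
  | [] => st
  | h :: _ =>
    if h ≠ first_pref then st
    else
      let ballot := bc.1
      let count := bc.2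
      let has_a := ballot.contains "A"
      let has_b := ballot.contains "B"
      if has_a && has_b then
        if (PySem.List.index? ballot "B").getD 0 < (PySem.List.index? ballot "A").getD 0 then
          (st.1 + count, st.2.1, st.2.2 + count)
        else
          (st.1, st.2.1 + count, st.2.2 + count)
      else if has_a && !has_b then
        (st.1, st.2.1 + count, st.2.2 + count)
      else if has_b && !has_a then
        (st.1 + count, st.2.1, st.2.2 + count)
      else st

def calculate_preference_distributions (ballot_counts : List (List String × Int)) (candidates : List String) (first_pref : String) : Int × Int × Int :=
  ballot_counts.foldl (pvStepA first_pref) (0, 0, 0)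

-- ===== PORT B =====
-- first element of the ballot equal to "A" or "B" (B's next(... ) generator)
def pvFirstAB : List String → Option String
  | [] => none
  | c :: rest => if c = "A" || c = "B" then some c else pvFirstAB rest

def pvStepB (first_pref : String) (st : Int × Int × Int) (bc : List String × Int) : Int × Int × Int :=
  match bc.1 with
  | [] => st
  | h :: _ =>
    if h = first_pref then
      match pvFirstAB bc.1 with
      | some "B" => (st.1 + bc.2, st.2.1, st.2.2 + bc.2)
      | some "A" => (st.1, st.2.1 + bc.2, st.2.2 + bc.2)
      | _ => st
    else st

def calculate_preference_distributions_alt (ballot_counts : List (List String × Int)) (candidates : List String) (first_pref : String) : Int × Int × Int :=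
  ballot_counts.foldl (pvStepB first_pref) (0, 0, 0)

-- ===== PRECONDITION & SPEC =====
def Spec_calculate_preference_distributions (ballot_counts : List (List String × Int)) (candidates : List String) (first_pref : String) (out : Int × Int × Int) : Prop := out = calculate_preference_distributions_alt ballot_counts candidates first_pref
instance (ballot_counts : List (List String × Int)) (candidates : List String) (first_pref : String) (out : Int × Int × Int) : Decidable (Spec_calculate_preference_distributions ballot_counts candidates first_pref out) := by unfold Spec_calculate_preference_distributions; infer_instance

-- ===== CLAIM (what is proved, stated in full; the proofs are below) =====
def Claim_equal_calculate_preference_distributions : Prop := ∀ (ballot_counts : List (List String × Int)) (candidates : List String) (first_pref : String), Dom_calculate_preference_distributions ballot_counts candidates first_pref → Spec_calculate_preference_distributions ballot_counts candidates first_pref (calculate_preference_distributions ballot_counts candidates first_pref)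

-- ===== LEMMAS AND PROOFS =====

-- the inner (post-guard) computations of the two loop bodies agree on every ballot
lemma inner_eq (l : List String) (c : Int) (st : Int × Int × Int) :
    (if l.contains "A" && l.contains "B" then
        if (PySem.List.index? l "B").getD 0 < (PySem.List.index? l "A").getD 0 then
          (st.1 + c, st.2.1, st.2.2 + c)
        else (st.1, st.2.1 + c, st.2.2 + c)
      else if l.contains "A" && !l.contains "B" then (st.1, st.2.1 + c, st.2.2 + c)
      else if l.contains "B" && !l.contains "A" then (st.1 + c, st.2.1, st.2.2 + c)
      else st)
    =
    (match pvFirstAB l with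
      | some "B" => (st.1 + c, st.2.1, st.2.2 + c)
      | some "A" => (st.1, st.2.1 + c, st.2.2 + c)
      | _ => st) := by
  induction l with
  | nil => simp [pvFirstAB]
  | cons h t ih =>
    by_cases hA : h = "A"
    · subst hA
      rw [show pvFirstAB ("A" :: t) = some "A" from by simp [pvFirstAB]]
      by_cases hB : "B" ∈ t
      · rcases Option.isSome_iff_exists.mp
            ((PySem.List.index?_isSome_iff t "B").mpr hB) with ⟨k, hk⟩
        rw [PySem.List.index?_cons_self,
            PySem.List.index?_cons_of_ne t (by decide : ("A" : String) ≠ "B"), hk]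
        simp [hB]
      · simp [hB]
    · by_cases hBh : h = "B"
      · subst hBh
        rw [show pvFirstAB ("B" :: t) = some "B" from by simp [pvFirstAB]]
        by_cases hA' : "A" ∈ t
        · rcases Option.isSome_iff_exists.mp
              ((PySem.List.index?_isSome_iff t "A").mpr hA') with ⟨k, hk⟩
          rw [PySem.List.index?_cons_self,
              PySem.List.index?_cons_of_ne t (by decide : ("B" : String) ≠ "A"), hk]
          simp [hA']
        · simp [hA']
      · -- head is neither "A" nor "B": both sides reduce to the tail case
        have hfa : pvFirstAB (h :: t) = pvFirstAB t := by simp [pvFirstAB, hA, hBh]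
        rw [hfa, ← ih]
        by_cases hA' : "A" ∈ t
        · by_cases hB' : "B" ∈ t
          · rcases Option.isSome_iff_exists.mp
                ((PySem.List.index?_isSome_iff t "A").mpr hA') with ⟨i, hi⟩
            rcases Option.isSome_iff_exists.mp
                ((PySem.List.index?_isSome_iff t "B").mpr hB') with ⟨j, hj⟩
            rw [PySem.List.index?_cons_of_ne t hA, PySem.List.index?_cons_of_ne t hBh,
                hi, hj]
            simp [hA', hB', hA, hBh, Nat.add_lt_add_iff_right]
          · simp [hA', hB', hA, hBh, Ne.symm hA, Ne.symm hBh]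
        · simp [hA', hA, hBh, Ne.symm hA, Ne.symm hBh]

lemma step_eq (first_pref : String) (st : Int × Int × Int) (bc : List String × Int) :
    pvStepA first_pref st bc = pvStepB first_pref st bc := by
  obtain ⟨l, c⟩ := bc
  cases l with
  | nil => rfl
  | cons h t =>
    unfold pvStepA pvStepB
    by_cases hh : h = first_pref
    · subst hh
      simpa using inner_eq (h :: t) c st
    · simp [hh]

-- ===== VERDICT (by name: the statement is the Claim_ definition above) =====
theorem calculate_preference_distributions_spec : Claim_equal_calculate_preference_distributions := by
  intro ballot_counts candidates first_pref _
  unfold Spec_calculate_preference_distributions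
  unfold calculate_preference_distributions calculate_preference_distributions_alt
  have h : pvStepA first_pref = pvStepB first_pref := by
    funext st bc; exact step_eq first_pref st bc
  rw [h]
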